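-- pv_equiv track=rewrite | github.com/DEsalasL/lopit_analyst | bin/mv_imp_norm_aggr.py | sorted_channels
-- ===== SOURCE A (Python) =====
-- channels = ['TMT126',
--             'TMT127N', 'TMT127C', 'TMT128N', 'TMT128C',
--             'TMT129N', 'TMT129C', 'TMT130N', 'TMT130C',
--             'TMT131N', 'TMT131C', 'TMT132N', 'TMT132C',
--             'TMT133N', 'TMT133C', 'TMT134N', 'TMT134C',
--             'TMT135N']
--
-- def sorted_channels(current_tmtcols, other):
--     tmts = [tmt.split('.')[0] for tmt in current_tmtcols]
--     exps = sorted(list(set([tmt.split('.')[-1] for tmt in current_tmtcols])))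
--     tmt_cols = []
--     for exp in exps:
--         for channel in channels:
--             if channel in tmts:
--                 tmt_cols.append(f'{channel}.{exp}')
--     sorted_cols = other + tmt_cols
--     return sorted_cols
-- ===== SOURCE B (Python) =====
-- channels = ['TMT126',
--             'TMT127N', 'TMT127C', 'TMT128N', 'TMT128C',
--             'TMT129N', 'TMT129C', 'TMT130N', 'TMT130C',
--             'TMT131N', 'TMT131C', 'TMT132N', 'TMT132C',
--             'TMT133N', 'TMT133C', 'TMT134N', 'TMT134C',
--             'TMT135N']
--
-- _rank = {c: i for i, c in enumerate(channels)}
--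
-- def sorted_channels(current_tmtcols, other):
--     # Sort-based: generate the (experiment, channel) candidate pairs in arbitrary
--     # order, then let a single composite-key sort produce the output order.
--     prefixes = {t.split('.')[0] for t in current_tmtcols}
--     exps = {t.split('.')[-1] for t in current_tmtcols}
--     pairs = [(e, p) for e in exps for p in prefixes if p in channels]
--     pairs.sort(key=lambda t: (t[0], _rank[t[1]]))
--     return other + [f'{p}.{e}' for e, p in pairs]
-- ===== Notes on version B (the rewrite author's own statement) =====
-- stated objective: alternative
-- what changed: B builds the (experiment, channel) candidate pairs in no particular order and obtains the output order from a single composite-key sort on (experiment, channel rank), instead of A's order-by-construction nested loops over pre-sorted experiments and the fixed channel list with a per-iteration membership scan.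
import Mathlib
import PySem

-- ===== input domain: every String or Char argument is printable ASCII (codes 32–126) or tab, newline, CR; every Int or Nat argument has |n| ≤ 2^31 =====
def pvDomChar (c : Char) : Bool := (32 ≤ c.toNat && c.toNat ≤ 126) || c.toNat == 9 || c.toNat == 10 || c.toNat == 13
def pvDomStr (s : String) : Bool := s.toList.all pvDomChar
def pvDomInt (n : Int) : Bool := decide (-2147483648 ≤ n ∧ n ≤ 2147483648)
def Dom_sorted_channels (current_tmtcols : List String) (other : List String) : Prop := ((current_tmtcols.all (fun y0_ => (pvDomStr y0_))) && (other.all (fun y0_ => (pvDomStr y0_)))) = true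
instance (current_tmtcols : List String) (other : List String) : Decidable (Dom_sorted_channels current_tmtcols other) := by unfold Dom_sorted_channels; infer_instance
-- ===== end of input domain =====

-- B replaces A's order-by-construction nested loops (sorted experiments outside, the fixed
-- channel list scanned inside, with a membership scan per iteration) by generating the
-- candidate (experiment, channel) pairs in arbitrary order and letting ONE composite-key
-- sort (experiment, channel rank) produce the output order.

def pvChannels : List String :=
  ["TMT126",
   "TMT127N", "TMT127C", "TMT128N", "TMT128C",
   "TMT129N", "TMT129C", "TMT130N", "TMT130C",
   "TMT131N", "TMT131C", "TMT132N", "TMT132C",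
   "TMT133N", "TMT133C", "TMT134N", "TMT134C",
   "TMT135N"]

-- ===== PORT A =====
-- tmt.split('.')[0] / [-1]: splitOn with a nonempty separator always yields a nonempty
-- list, so the indexings never raise; headD/getLastD "" is exact here.
def sorted_channels (current_tmtcols : List String) (other : List String) : List String :=
  let tmts := current_tmtcols.map (fun tmt => (((PySem.Str.split? tmt ".").getD [])).headD "")
  let exps := PySem.List.sorted
    (PySem.Set.ofList (current_tmtcols.map (fun tmt => (((PySem.Str.split? tmt ".").getD [])).getLastD "")))
    (fun x : String => x) false
  let tmt_cols := exps.foldl (fun acc exp =>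
    pvChannels.foldl (fun acc channel =>
      if tmts.contains channel then acc ++ [channel ++ "." ++ exp] else acc) acc) []
  other ++ tmt_cols

-- ===== PORT B =====
-- _rank = {c: i for i, c in enumerate(channels)}
def pvRank : PySem.Dict String Int :=
  (PySem.List.enumerate pvChannels).foldl (fun d ic => d.insert ic.2 ic.1) PySem.Dict.empty

-- _rank[t[1]] never raises (every kept pair's channel is a key of _rank), so getD 0 is exact.
def sorted_channels_alt (current_tmtcols : List String) (other : List String) : List String :=
  let prefixes := PySem.Set.ofList
    (current_tmtcols.map (fun t => (((PySem.Str.split? t ".").getD [])).headD ""))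
  let exps := PySem.Set.ofList
    (current_tmtcols.map (fun t => (((PySem.Str.split? t ".").getD [])).getLastD ""))
  let pairs := List.flatMap
    (fun e => (prefixes.filter (fun p => pvChannels.contains p)).map (fun p => (e, p))) exps
  let sortedPairs := PySem.List.sorted2 pairs (fun t => t.1)
    (fun t => (PySem.Dict.get? pvRank t.2).getD 0) false
  other ++ sortedPairs.map (fun t => t.2 ++ "." ++ t.1)

-- ===== PRECONDITION & SPEC =====
def Spec_sorted_channels (current_tmtcols : List String) (other : List String) (out : List String) : Prop := out = sorted_channels_alt current_tmtcols other
instance (current_tmtcols : List String) (other : List String) (out : List String) : Decidable (Spec_sorted_channels current_tmtcols other out) := by unfold Spec_sorted_channels; infer_instance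

-- ===== CLAIM (what is proved, stated in full; the proofs are below) =====
def Claim_equal_sorted_channels : Prop := ∀ (current_tmtcols : List String) (other : List String), Dom_sorted_channels current_tmtcols other → Spec_sorted_channels current_tmtcols other (sorted_channels current_tmtcols other)

-- ===== LEMMAS AND PROOFS =====

-- the channel rank B sorts by (second key)
def pvRankKey (c : String) : Int := (PySem.Dict.get? pvRank c).getD 0

-- the lexicographic Bool comparison sorted2 uses, specialised to B's keys
def pvLex (a b : String × String) : Bool :=
  decide (a.1 < b.1) || (!decide (b.1 < a.1) && decide (pvRankKey a.2 < pvRankKey b.2))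

theorem pvLex_asymm (a b : String × String) (h : pvLex a b = true) : pvLex b a = false := by
  by_contra hc
  have h2 : pvLex b a = true := by
    cases hval : pvLex b a
    · exact absurd hval hc
    · rfl
  simp only [pvLex, Bool.or_eq_true, Bool.and_eq_true, Bool.not_eq_true',
    decide_eq_true_eq, decide_eq_false_iff_not] at h h2
  rcases h with h | ⟨ha, hb⟩ <;> rcases h2 with g | ⟨ga, gb⟩
  · exact absurd g (asymm h)
  · exact ga h
  · exact ha g
  · exact absurd gb (asymm hb)

theorem pvLex_trans (a b c : String × String) (h1 : pvLex a b = true) (h2 : pvLex b c = true) :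
    pvLex a c = true := by
  simp only [pvLex, Bool.or_eq_true, Bool.and_eq_true, Bool.not_eq_true',
    decide_eq_true_eq, decide_eq_false_iff_not] at h1 h2 ⊢
  rcases h1 with h1 | ⟨h1a, h1b⟩ <;> rcases h2 with h2 | ⟨h2a, h2b⟩
  · exact Or.inl (lt_trans h1 h2)
  · exact Or.inl (lt_of_lt_of_le h1 (not_lt.mp h2a))
  · exact Or.inl (lt_of_le_of_lt (not_lt.mp h1a) h2)
  · exact Or.inr ⟨fun hca => absurd hca (not_lt.mpr (le_trans (not_lt.mp h1a) (not_lt.mp h2a))),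
      lt_trans h1b h2b⟩

-- insertBy with an asymmetric transitive Bool order preserves "no element is strictly before a predecessor"
theorem pv_insertBy_pairwise (lt : (String × String) → (String × String) → Bool)
    (hA : ∀ a b, lt a b = true → lt b a = false)
    (hT : ∀ a b c, lt a b = true → lt b c = true → lt a c = true)
    (x : String × String) (ys : List (String × String))
    (h : ys.Pairwise (fun a b => lt b a = false)) :
    (PySem.List.insertBy lt x ys).Pairwise (fun a b => lt b a = false) := by
  induction ys with
  | nil => simp [PySem.List.insertBy]
  | cons y ys ih =>
    rcases List.pairwise_cons.mp h with ⟨hy, hys⟩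
    by_cases hxy : lt x y = true
    · simp only [PySem.List.insertBy, hxy, if_true]
      refine List.pairwise_cons.mpr ⟨?_, h⟩
      intro z hz
      rcases List.mem_cons.mp hz with rfl | hz
      · exact hA _ _ hxy
      · by_contra hzx
        have hzx' : lt z x = true := by
          cases hval : lt z x
          · exact absurd hval hzx
          · rfl
        exact absurd (hy z hz) (by simp [hT _ _ _ hzx' hxy])
    · simp only [PySem.List.insertBy, hxy]
      refine List.pairwise_cons.mpr ⟨?_, ih hys⟩
      intro z hz
      rcases (PySem.List.insertBy_mem_iff lt x z ys).mp hz with rfl | hz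
      · simpa using hxy
      · exact hy z hz

theorem pv_foldl_insertBy_pairwise (lt : (String × String) → (String × String) → Bool)
    (hA : ∀ a b, lt a b = true → lt b a = false)
    (hT : ∀ a b c, lt a b = true → lt b c = true → lt a c = true) :
    ∀ (xs acc : List (String × String)), acc.Pairwise (fun a b => lt b a = false) →
      (xs.foldl (fun acc x => PySem.List.insertBy lt x acc) acc).Pairwise
        (fun a b => lt b a = false) := by
  intro xs
  induction xs with
  | nil => intro acc h; simpa using h
  | cons x xs ih => intro acc h; exact ih _ (pv_insertBy_pairwise lt hA hT x acc h)

-- the rank key is strictly increasing along the channel list, hence injective on it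
theorem pv_rank_strict : (pvChannels.map pvRankKey).Pairwise (· < ·) := by decide

theorem pv_rank_inj : ∀ x ∈ pvChannels, ∀ y ∈ pvChannels, pvRankKey x = pvRankKey y → x = y := by
  decide

theorem pv_channels_nodup : pvChannels.Nodup := by decide

-- the central fact: B's single composite-key sort of the unordered pair list equals
-- A's order-by-construction pair list (sorted experiments outside, channel order inside)
theorem pv_sort_eq (tm sx : List String) :
    PySem.List.sorted2
      (List.flatMap
        (fun e => ((PySem.Set.ofList tm).filter (fun p => pvChannels.contains p)).map
          (fun p => (e, p)))
        (PySem.Set.ofList sx))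
      (fun t => t.1) (fun t => (PySem.Dict.get? pvRank t.2).getD 0) false
    = List.flatMap
        (fun e => (pvChannels.filter (fun c => tm.contains c)).map (fun c => (e, c)))
        (PySem.List.sorted (PySem.Set.ofList sx) (fun x : String => x) false) := by
  classical
  have hkey : (fun t : String × String => (PySem.Dict.get? pvRank t.2).getD 0) = fun t => pvRankKey t.2 := rfl
  rw [hkey]
  set P := PySem.Set.ofList tm with hP
  set E := PySem.Set.ofList sx with hE
  set SE := PySem.List.sorted E (fun x : String => x) false with hSE
  set present := pvChannels.filter (fun c => tm.contains c) with hpres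
  set pairs := List.flatMap (fun e => (P.filter (fun p => pvChannels.contains p)).map
    (fun p => (e, p))) E with hpairs
  set K := PySem.List.sorted2 pairs (fun t => t.1) (fun t => pvRankKey t.2) false with hK
  set T := List.flatMap (fun e => present.map (fun c => (e, c))) SE with hT
  -- the filtered prefix set is a permutation of the filtered channel list
  have hPP : (P.filter (fun p => pvChannels.contains p)).Perm present := by
    rw [List.perm_ext_iff_of_nodup
      ((PySem.Set.nodup_ofList tm).filter _) (pv_channels_nodup.filter _)]
    intro a
    simp only [List.mem_filter, PySem.Set.mem_ofList, List.contains_iff_mem]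
    tauto
  -- K is a permutation of T
  have hperm : K.Perm T := by
    refine (PySem.List.sorted2_perm pairs _ _ false).trans ?_
    refine List.Perm.flatMap ((PySem.List.sorted_perm E _ false).symm) ?_
    intro e _
    exact hPP.map _
  -- membership facts: second components lie in the channel list
  have hmemP : ∀ a ∈ K, a.2 ∈ pvChannels := by
    intro a ha
    have : a ∈ T := hperm.mem_iff.mp ha
    rcases List.mem_flatMap.mp this with ⟨e, _, hae⟩
    rcases List.mem_map.mp hae with ⟨c, hc, rfl⟩
    exact (List.mem_filter.mp hc).1
  have hmemT : ∀ a ∈ T, a.2 ∈ pvChannels := by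
    intro a ha
    rcases List.mem_flatMap.mp ha with ⟨e, _, hae⟩
    rcases List.mem_map.mp hae with ⟨c, hc, rfl⟩
    exact (List.mem_filter.mp hc).1
  -- K is sorted (no element strictly before a predecessor)
  have hKsorted : K.Pairwise (fun a b => pvLex b a = false) := by
    have : K = pairs.foldl (fun acc x => PySem.List.insertBy pvLex x acc) [] := rfl
    rw [this]
    exact pv_foldl_insertBy_pairwise pvLex pvLex_asymm pvLex_trans pairs [] (by simp)
  -- T is strictly sorted
  have hTlt : T.Pairwise (fun a b => pvLex a b = true) := by
    rw [hT, List.flatMap_def, List.pairwise_flatten]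
    constructor
    · intro l hl
      rcases List.mem_map.mp hl with ⟨e, _, rfl⟩
      rw [List.pairwise_map]
      have hch : present.Pairwise (fun a b => pvRankKey a < pvRankKey b) :=
        List.Pairwise.sublist List.filter_sublist (List.pairwise_map.mp pv_rank_strict)
      refine hch.imp ?_
      intro a b hab
      simp [pvLex, hab]
    · have hse : SE.Pairwise (· < ·) := PySem.List.sorted_ofList_pairwise_lt sx
      rw [List.pairwise_map]
      refine hse.imp ?_
      intro e1 e2 h12 x hx y hy
      rcases List.mem_map.mp hx with ⟨c1, _, rfl⟩
      rcases List.mem_map.mp hy with ⟨c2, _, rfl⟩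
      simp [pvLex, h12]
  have hTsorted : T.Pairwise (fun a b => pvLex b a = false) :=
    hTlt.imp (fun h => pvLex_asymm _ _ h)
  -- two sorted permutations with an antisymmetric order agree
  refine List.Perm.eq_of_pairwise ?_ hKsorted hTsorted hperm
  intro a b ha hb hab hba
  simp only [pvLex, Bool.or_eq_false_iff, Bool.and_eq_false_iff, Bool.not_eq_false',
    decide_eq_false_iff_not, decide_eq_true_eq] at hab hba
  have h1 : a.1 = b.1 := le_antisymm (not_lt.mp hab.1) (not_lt.mp hba.1)
  have h2 : pvRankKey a.2 = pvRankKey b.2 := by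
    rcases hab.2 with h | h
    · exact absurd h hba.1
    · rcases hba.2 with g | g
      · exact absurd g hab.1
      · exact le_antisymm (not_lt.mp h) (not_lt.mp g)
  have h2' : a.2 = b.2 := pv_rank_inj a.2 (hmemP a ha) b.2 (hmemT b hb) h2
  exact Prod.ext h1 h2'

-- ===== VERDICT (by name: the statement is the Claim_ definition above) =====
theorem sorted_channels_spec : Claim_equal_sorted_channels := by
  intro cur other _
  show _ = _
  unfold sorted_channels sorted_channels_alt
  simp only [PySem.List.foldl_append_if, PySem.List.foldl_append_eq_flatMap]
  rw [pv_sort_eq (cur.map (fun tmt => ((PySem.Str.split? tmt ".").getD []).headD ""))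
        (cur.map (fun tmt => ((PySem.Str.split? tmt ".").getD []).getLastD ""))]
  simp only [List.map_flatMap, List.map_map, List.nil_append]
  rfl
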